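-- pv_equiv track=rewrite | github.com/yuvanmuru-dev/HackUTD-Toyota | toyota-vehicle-finder/backend/app/chatbot.py | _extract_models_from_text
-- ===== SOURCE A (Python) =====
-- from typing import Optional, List, Dict, Tuple
--
-- _MODEL_ALIASES: Dict[str, List[str]] = {
--     "camry": ["camry"],
--     "corolla": ["corolla", "carolla", "corola", "carola"],
--     "rav4": ["rav4", "rav-4", "rav 4"],
--     "highlander": ["highlander"],
--     "prius": ["prius"],
--     "tacoma": ["tacoma"],
--     "tundra": ["tundra"],
--     "4runner": ["4runner", "4 runner", "four runner"],
--     "sienna": ["sienna"],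
--     "sequoia": ["sequoia"],
--     "venza": ["venza"],
--     "c-hr": ["c-hr", "chr"],
--     "avalon": ["avalon"],
--     "supra": ["supra", "gr supra"],
--     "gr86": ["gr86", "gr 86", "86"],
-- }
--
-- def _extract_models_from_text(text: str) -> List[str]:
--     t = text.lower()
--     found: List[str] = []
--     for canonical, variants in _MODEL_ALIASES.items():
--         if any(v in t for v in variants):
--             found.append(canonical)
--     # preserve order, unique
--     seen, ordered = set(), []
--     for m in found:
--         if m not in seen:
--             ordered.append(m)
--             seen.add(m)
--     return ordered
-- ===== SOURCE B (Python) =====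
-- # B: position-major single scan — walk the lowercased text once, at each position try
-- # every (variant, canonical) pair with startswith, collecting matched canonicals in a
-- # set; then emit canonicals by filtering _MODEL_ALIASES keys in insertion order
-- # (no separate dedup pass needed).
-- from typing import List, Dict
--
-- _MODEL_ALIASES: Dict[str, List[str]] = {
--     "camry": ["camry"],
--     "corolla": ["corolla", "carolla", "corola", "carola"],
--     "rav4": ["rav4", "rav-4", "rav 4"],
--     "highlander": ["highlander"],
--     "prius": ["prius"],
--     "tacoma": ["tacoma"],
--     "tundra": ["tundra"],
--     "4runner": ["4runner", "4 runner", "four runner"],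
--     "sienna": ["sienna"],
--     "sequoia": ["sequoia"],
--     "venza": ["venza"],
--     "c-hr": ["c-hr", "chr"],
--     "avalon": ["avalon"],
--     "supra": ["supra", "gr supra"],
--     "gr86": ["gr86", "gr 86", "86"],
-- }
--
-- _VARIANT_TO_CANON: List = [(v, c) for c, vs in _MODEL_ALIASES.items() for v in vs]
--
-- def _extract_models_from_text(text: str) -> List[str]:
--     t = text.lower()
--     matched = set()
--     for i in range(len(t) + 1):
--         for variant, canonical in _VARIANT_TO_CANON:
--             if t.startswith(variant, i):
--                 matched.add(canonical)
--     return [c for c in _MODEL_ALIASES if c in matched]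
-- ===== Notes on version B (the rewrite author's own statement) =====
-- stated objective: alternative
-- what changed: A loops variant-major (per alias group, substring-search each variant, then a separate seen-set dedup pass); B scans the lowercased text position-major once, testing each (variant, canonical) pair with startswith at every position into one matched set, then emits by filtering the alias keys in insertion order with no dedup pass.
import Mathlib
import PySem

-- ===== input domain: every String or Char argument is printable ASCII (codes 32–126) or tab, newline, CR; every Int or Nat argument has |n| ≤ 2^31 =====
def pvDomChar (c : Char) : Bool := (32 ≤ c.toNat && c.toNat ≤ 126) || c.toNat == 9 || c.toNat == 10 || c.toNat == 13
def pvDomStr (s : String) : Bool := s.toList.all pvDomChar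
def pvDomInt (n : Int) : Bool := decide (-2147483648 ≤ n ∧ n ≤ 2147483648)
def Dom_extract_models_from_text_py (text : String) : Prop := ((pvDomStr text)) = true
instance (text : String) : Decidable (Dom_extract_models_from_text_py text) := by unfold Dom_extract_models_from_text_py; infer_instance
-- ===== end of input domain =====

-- B replaces A's variant-major substring loop plus dedup pass by a position-major single
-- scan collecting matched canonicals in a set, then filters the alias keys in insertion
-- order; alternative structure, same observable result.

-- ===== PORT A =====
def modelAliases : List (String × List String) :=
  [("camry", ["camry"]),
   ("corolla", ["corolla", "carolla", "corola", "carola"]),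
   ("rav4", ["rav4", "rav-4", "rav 4"]),
   ("highlander", ["highlander"]),
   ("prius", ["prius"]),
   ("tacoma", ["tacoma"]),
   ("tundra", ["tundra"]),
   ("4runner", ["4runner", "4 runner", "four runner"]),
   ("sienna", ["sienna"]),
   ("sequoia", ["sequoia"]),
   ("venza", ["venza"]),
   ("c-hr", ["c-hr", "chr"]),
   ("avalon", ["avalon"]),
   ("supra", ["supra", "gr supra"]),
   ("gr86", ["gr86", "gr 86", "86"])]

def extract_models_from_text_py (text : String) : List String :=
  let t := PySem.Str.lower text
  let found : List String := modelAliases.foldl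
    (fun found p => if p.2.any (fun v => PySem.Str.isIn v t) then found ++ [p.1] else found) []
  (found.foldl
    (fun (st : PySem.Set String × List String) m =>
      if PySem.Set.contains st.1 m then st else (PySem.Set.add st.1 m, st.2 ++ [m]))
    (PySem.Set.empty, [])).2

-- ===== PORT B =====
def variantToCanon : List (String × String) :=
  modelAliases.flatMap (fun p => p.2.map (fun v => (v, p.1)))

def extract_models_from_text_py_alt (text : String) : List String :=
  let t := (PySem.Str.lower text).toList
  let matched : PySem.Set String :=
    (List.range (t.length + 1)).foldl
      (fun s i => variantToCanon.foldl
        (fun s q => if PySem.Chars.startswith (t.drop i) q.1.toList then PySem.Set.add s q.2 else s) s)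
      PySem.Set.empty
  (modelAliases.map Prod.fst).filter (fun c => PySem.Set.contains matched c)

-- ===== PRECONDITION & SPEC =====
def Spec_extract_models_from_text_py (text : String) (out : List String) : Prop := out = extract_models_from_text_py_alt text
instance (text : String) (out : List String) : Decidable (Spec_extract_models_from_text_py text out) := by unfold Spec_extract_models_from_text_py; infer_instance

-- ===== CLAIM (what is proved, stated in full; the proofs are below) =====
def Claim_equal_extract_models_from_text_py : Prop := ∀ (text : String), Dom_extract_models_from_text_py text → Spec_extract_models_from_text_py text (extract_models_from_text_py text)

-- ===== LEMMAS AND PROOFS =====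

-- A's dedup pass is the identity on a list that is already Nodup and disjoint from `s`.
theorem dedup_loop_id (l : List String) : ∀ (s : PySem.Set String) (out : List String),
    l.Nodup → (∀ x ∈ l, x ∉ s) →
    (l.foldl (fun (st : PySem.Set String × List String) m =>
        if PySem.Set.contains st.1 m then st else (PySem.Set.add st.1 m, st.2 ++ [m]))
      (s, out)).2 = out ++ l := by
  induction l with
  | nil => intro s out _ _; simp
  | cons x l ih =>
    intro s out hnd hdisj
    have hx : x ∉ s := hdisj x (by simp)
    have hc : PySem.Set.contains s x = false := by
      rw [Bool.eq_false_iff]; intro h; exact hx ((PySem.Set.contains_iff s x).1 h)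
    rw [List.foldl_cons, hc]
    simp only [Bool.false_eq_true, if_false]
    rw [ih (PySem.Set.add s x) (out ++ [x]) hnd.of_cons ?_]
    · simp
    · intro y hy hmem
      rcases (PySem.Set.mem_add s x y).1 hmem with h | h
      · exact hdisj y (by simp [hy]) h
      · exact (List.nodup_cons.1 hnd).1 (h ▸ hy)

-- membership in a fold that conditionally adds to a set
theorem mem_foldl_add_if {α : Type} (cond : α → Bool) (f : α → String) (c : String) :
    ∀ (l : List α) (s : PySem.Set String),
    c ∈ l.foldl (fun s q => if cond q then PySem.Set.add s (f q) else s) s ↔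
      c ∈ s ∨ ∃ q ∈ l, cond q = true ∧ f q = c := by
  intro l
  induction l with
  | nil => intro s; simp
  | cons x l ih =>
    intro s
    simp only [List.foldl_cons]
    by_cases hx : cond x = true
    · rw [if_pos hx, ih, PySem.Set.mem_add]
      constructor
      · rintro (⟨h | h⟩ | ⟨q, hq, hcq, hfq⟩)
        · exact Or.inl h
        · exact Or.inr ⟨x, by simp, hx, h.symm⟩
        · exact Or.inr ⟨q, by simp [hq], hcq, hfq⟩
      · rintro (h | ⟨q, hq, hcq, hfq⟩)
        · exact Or.inl (Or.inl h)
        · rcases List.mem_cons.1 hq with rfl | hq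
          · exact Or.inl (Or.inr hfq.symm)
          · exact Or.inr ⟨q, hq, hcq, hfq⟩
    · rw [if_neg hx, ih]
      constructor
      · rintro (h | ⟨q, hq, hcq, hfq⟩)
        · exact Or.inl h
        · exact Or.inr ⟨q, by simp [hq], hcq, hfq⟩
      · rintro (h | ⟨q, hq, hcq, hfq⟩)
        · exact Or.inl h
        · rcases List.mem_cons.1 hq with rfl | hq
          · exact absurd hcq hx
          · exact Or.inr ⟨q, hq, hcq, hfq⟩

-- membership in B's doubly-nested fold
theorem mem_matched (tl : List Char) (c : String) (il : List Nat) :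
    ∀ (s : PySem.Set String),
    c ∈ il.foldl
        (fun s i => variantToCanon.foldl
          (fun s q => if PySem.Chars.startswith (tl.drop i) q.1.toList then PySem.Set.add s q.2 else s) s)
        s ↔
      c ∈ s ∨ ∃ i ∈ il, ∃ q ∈ variantToCanon,
        PySem.Chars.startswith (tl.drop i) q.1.toList = true ∧ q.2 = c := by
  induction il with
  | nil => intro s; simp
  | cons i il ih =>
    intro s
    simp only [List.foldl_cons]
    rw [ih, mem_foldl_add_if
      (fun q : String × String => PySem.Chars.startswith (tl.drop i) q.1.toList) Prod.snd c]
    constructor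
    · rintro (⟨h | ⟨q, hq, hsw, hfq⟩⟩ | ⟨j, hj, q, hq, hsw, hfq⟩)
      · exact Or.inl h
      · exact Or.inr ⟨i, by simp, q, hq, hsw, hfq⟩
      · exact Or.inr ⟨j, by simp [hj], q, hq, hsw, hfq⟩
    · rintro (h | ⟨j, hj, q, hq, hsw, hfq⟩)
      · exact Or.inl (Or.inl h)
      · rcases List.mem_cons.1 hj with rfl | hj
        · exact Or.inl (Or.inr ⟨q, hq, hsw, hfq⟩)
        · exact Or.inr ⟨j, hj, q, hq, hsw, hfq⟩

-- scanning all start positions 0..len finds exactly the substrings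
theorem exists_start_iff_isIn (tl v : List Char) :
    (∃ i ∈ List.range (tl.length + 1), PySem.Chars.startswith (tl.drop i) v = true) ↔
      PySem.Chars.isIn v tl = true := by
  rw [← PySem.Chars.exists_prefix_drop_iff_isIn]
  constructor
  · rintro ⟨i, _, h⟩
    exact ⟨i, (PySem.Chars.startswith_iff _ _).1 h⟩
  · rintro ⟨j, h⟩
    by_cases hj : j ≤ tl.length
    · exact ⟨j, List.mem_range.2 (by omega), (PySem.Chars.startswith_iff _ _).2 h⟩
    · refine ⟨tl.length, List.mem_range.2 (by omega), (PySem.Chars.startswith_iff _ _).2 ?_⟩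
      rw [List.drop_length]
      rw [List.drop_eq_nil_of_le (by omega)] at h
      exact h

-- two entries of a fst-nodup list with equal keys coincide
theorem eq_of_mem_of_fst_eq {α β : Type} {l : List (α × β)} (hnd : (l.map Prod.fst).Nodup)
    {p q : α × β} (hp : p ∈ l) (hq : q ∈ l) (h : p.1 = q.1) : p = q := by
  induction l with
  | nil => cases hp
  | cons x l ih =>
    rw [List.map_cons, List.nodup_cons] at hnd
    obtain ⟨hx, hnd'⟩ := hnd
    rcases List.mem_cons.1 hp with rfl | hp' <;> rcases List.mem_cons.1 hq with rfl | hq'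
    · rfl
    · exact absurd (show p.1 ∈ l.map Prod.fst by rw [h]; exact List.mem_map_of_mem hq') hx
    · exact absurd (show q.1 ∈ l.map Prod.fst by rw [← h]; exact List.mem_map_of_mem hp') hx
    · exact ih hnd' hp' hq'

theorem keys_nodup : (modelAliases.map Prod.fst).Nodup := by decide

theorem extract_models_spec (text : String) :
    extract_models_from_text_py text = extract_models_from_text_py_alt text := by
  simp only [extract_models_from_text_py, extract_models_from_text_py_alt]
  rw [PySem.List.foldl_append_if
      (fun p : String × List String => p.2.any (fun v => PySem.Str.isIn v (PySem.Str.lower text)))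
      Prod.fst, List.nil_append]
  rw [dedup_loop_id _ PySem.Set.empty []
      (keys_nodup.sublist (List.Sublist.map Prod.fst List.filter_sublist))
      (by intro x _ hx; simp [PySem.Set.empty] at hx), List.nil_append]
  rw [List.filter_map]
  apply congrArg (List.map Prod.fst)
  apply List.filter_congr
  intro p hp
  simp only [Function.comp]
  rw [Bool.eq_iff_iff, PySem.Set.contains_iff, mem_matched]
  constructor
  · intro h
    rcases List.any_eq_true.1 h with ⟨v, hv, hin⟩
    rw [PySem.Str.isIn_eq] at hin
    rcases (exists_start_iff_isIn _ v.toList).2 hin with ⟨i, hi, hsw⟩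
    exact Or.inr ⟨i, hi, (v, p.1), List.mem_flatMap.2 ⟨p, hp, List.mem_map_of_mem hv⟩, hsw, rfl⟩
  · rintro (h | ⟨i, hi, q, hq, hsw, hfq⟩)
    · simp [PySem.Set.empty] at h
    · rcases List.mem_flatMap.1 hq with ⟨p', hp', hq'⟩
      rcases List.mem_map.1 hq' with ⟨v, hv, rfl⟩
      have hpp : p' = p := eq_of_mem_of_fst_eq keys_nodup hp' hp hfq
      subst hpp
      refine List.any_eq_true.2 ⟨v, hv, ?_⟩
      rw [PySem.Str.isIn_eq]
      exact (exists_start_iff_isIn _ v.toList).1 ⟨i, hi, hsw⟩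

-- ===== VERDICT (by name: the statement is the Claim_ definition above) =====
theorem extract_models_from_text_py_spec : Claim_equal_extract_models_from_text_py := by
  intro text _
  unfold Spec_extract_models_from_text_py
  exact extract_models_spec text
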